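-- pv_equiv track=rewrite | github.com/jose-a-sa/interview-problems | Python/tritiling.py | duotiling
-- ===== SOURCE A (Python) =====
-- def duotiling(n):
--     dp = [[0 for j in range(4)] for i in range(n+1)]
--     dp[0][3] = 1
--     i = 1
--     while i <= n:
--         dp[i][0] = dp[i-1][3]
--         #dp[i][1] = dp[i-1][2]
--         #dp[i][2] = dp[i-1][1]
--         dp[i][3] = dp[i-1][0] + dp[i-1][3]
--         i += 1
--     return dp
-- ===== SOURCE B (Python) =====
-- def duotiling(n):
--     # Each row is [F(i), 0, 0, F(i+1)]; columns 1 and 2 of the table are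
--     # identically zero.  Instead of a linear dp sweep, compute each Fibonacci
--     # pair independently by the fast-doubling divide-and-conquer recursion.
--     def fib_pair(k):
--         # returns (F(k), F(k+1)) by fast doubling
--         if k == 0:
--             return (0, 1)
--         a, b = fib_pair(k // 2)
--         c = a * (2 * b - a)          # F(2m)   where m = k // 2
--         d = a * a + b * b            # F(2m+1)
--         if k % 2 == 0:
--             return (c, d)
--         return (d, c + d)
--     out = []
--     for i in range(n + 1):
--         f, g = fib_pair(i)
--         out.append([f, 0, 0, g])
--     return out
-- ===== Notes on version B (the rewrite author's own statement) =====
-- stated objective: alternative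
-- what changed: Replaces the self-referential dp table filled by a linear sweep with a divide-and-conquer fast-doubling recursion that computes each row's Fibonacci pair independently by recursing on the halved index, and builds each four-entry row directly from that pair.
import Mathlib
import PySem

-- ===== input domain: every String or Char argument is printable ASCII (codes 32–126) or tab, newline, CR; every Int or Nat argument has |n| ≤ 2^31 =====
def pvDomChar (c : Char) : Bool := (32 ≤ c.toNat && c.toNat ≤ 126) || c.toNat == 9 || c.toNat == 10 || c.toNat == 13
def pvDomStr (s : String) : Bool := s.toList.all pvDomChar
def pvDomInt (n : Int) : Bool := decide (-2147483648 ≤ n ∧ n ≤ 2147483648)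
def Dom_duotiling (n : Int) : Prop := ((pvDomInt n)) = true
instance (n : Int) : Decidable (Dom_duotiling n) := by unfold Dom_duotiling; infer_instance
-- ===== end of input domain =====

-- B replaces A's linearly-swept 2D dp table by a fast-doubling divide-and-conquer recursion computing each row's Fibonacci pair independently; objective: alternative.


-- ===== PORT A =====
-- one iteration of A's while loop: two in-place element assignments on row i, reading row i-1
def duotilingStep (dp : List (List Int)) (i : Int) : List (List Int) :=
  -- dp[i][0] = dp[i-1][3]  (indices are in range for every loop iteration admitted by Pre_)
  let prev := (PySem.List.pyGet? dp (i-1)).getD []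
  let v0 := (PySem.List.pyGet? prev 3).getD 0
  let dp1 := match PySem.List.pyGet? dp i with
    | some r => dp.set i.toNat (r.set 0 v0)
    | none => dp
  -- dp[i][3] = dp[i-1][0] + dp[i-1][3]
  let prev1 := (PySem.List.pyGet? dp1 (i-1)).getD []
  let v3 := ((PySem.List.pyGet? prev1 0).getD 0) + ((PySem.List.pyGet? prev1 3).getD 0)
  match PySem.List.pyGet? dp1 i with
  | some r => dp1.set i.toNat (r.set 3 v3)
  | none => dp1

def duotiling (n : Int) : List (List Int) :=
  let dp := (PySem.List.pyRange 0 (n+1) 1).map (fun _ => (PySem.List.pyRange 0 4 1).map (fun _ => (0:Int)))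
  -- dp[0][3] = 1  (IndexError when dp is empty, i.e. negative n: excluded by Pre_)
  let dp := match dp with
    | r :: rest => (r.set 3 1) :: rest
    | [] => []
  (PySem.List.pyRange 1 (n+1) 1).foldl duotilingStep dp

-- ===== PORT B =====
-- fast-doubling helper fib_pair of Source B; Python's loop index i ≥ 0 is passed as i.toNat (exact there)
def fibPair (k : Nat) : Int × Int :=
  if h : k = 0 then (0, 1)
  else
    let p := fibPair (k / 2)
    let a := p.1
    let b := p.2
    let c := a * (2 * b - a)
    let d := a * a + b * b
    if k % 2 == 0 then (c, d) else (d, c + d)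
termination_by k
decreasing_by exact Nat.div_lt_self (Nat.pos_of_ne_zero h) (by omega)

def duotiling_alt (n : Int) : List (List Int) :=
  (PySem.List.pyRange 0 (n+1) 1).foldl
    (fun out i =>
      let p := fibPair i.toNat
      out ++ [[p.1, 0, 0, p.2]]) []

-- ===== PRECONDITION & SPEC =====
-- Pre_ excludes exactly negative n, where A raises IndexError seeding the first row of the then-empty table (B returns an empty table there).
def Pre_duotiling (n : Int) : Prop := 0 ≤ n
instance (n : Int) : Decidable (Pre_duotiling n) := by unfold Pre_duotiling; infer_instance
def pvWitness_duotiling : Int := (3)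

def Spec_duotiling (n : Int) (out : List (List Int)) : Prop := out = duotiling_alt n
instance (n : Int) (out : List (List Int)) : Decidable (Spec_duotiling n out) := by unfold Spec_duotiling; infer_instance

-- ===== CLAIM (what is proved, stated in full; the proofs are below) =====
def Claim_equal_duotiling : Prop := ∀ (n : Int), Dom_duotiling n → Pre_duotiling n → Spec_duotiling n (duotiling n)

-- ===== LEMMAS AND PROOFS =====
-- the Fibonacci numbers, as the table's nonzero columns contain them
def fibF : Nat → Int
  | 0 => 0
  | 1 => 1
  | (k+2) => fibF k + fibF (k+1)

-- row i of the table
def rowF (k : Nat) : List Int := [fibF k, 0, 0, fibF (k+1)]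

theorem fibF_eq_fib (k : Nat) : fibF k = (Nat.fib k : Int) := by
  induction k using Nat.strong_induction_on with
  | _ k ih =>
    match k with
    | 0 => rfl
    | 1 => rfl
    | (m+2) =>
      rw [fibF, Nat.fib_add_two, ih m (by omega), ih (m+1) (by omega)]
      push_cast; ring

-- correctness of the fast-doubling recursion
theorem fibPair_eq (k : Nat) : fibPair k = (fibF k, fibF (k+1)) := by
  induction k using Nat.strong_induction_on with
  | _ k ih =>
    rw [fibPair]
    by_cases h : k = 0
    · subst h; rfl
    · simp only [h, dif_neg, not_false_iff]
      rw [ih (k/2) (Nat.div_lt_self (Nat.pos_of_ne_zero h) (by omega))]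
      have hle : Nat.fib (k/2) ≤ 2 * Nat.fib (k/2 + 1) := by
        have := Nat.fib_le_fib_succ (n := k/2); omega
      have hc : fibF (k/2) * (2 * fibF (k/2 + 1) - fibF (k/2)) = fibF (2 * (k/2)) := by
        rw [fibF_eq_fib, fibF_eq_fib, fibF_eq_fib, Nat.fib_two_mul]
        push_cast [hle]; ring
      have hd : fibF (k/2) * fibF (k/2) + fibF (k/2 + 1) * fibF (k/2 + 1)
          = fibF (2 * (k/2) + 1) := by
        rw [fibF_eq_fib, fibF_eq_fib, fibF_eq_fib, Nat.fib_two_mul_add_one]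
        push_cast; ring
      by_cases hp : k % 2 = 0
      · have hk : 2 * (k/2) = k := by omega
        simp only [hp, beq_self_eq_true, if_true]
        rw [hc, hd, hk]
      · have hk : 2 * (k/2) + 1 = k := by omega
        have hk2 : k + 1 = 2 * (k/2) + 2 := by omega
        simp only [show (k % 2 == 0) = false from by simp [hp]]
        rw [hc, hd, hk, hk2]
        have : fibF (2*(k/2)+2) = fibF (2*(k/2)) + fibF (2*(k/2)+1) := rfl
        rw [this, hk]
        simp

-- appending rows in a fold is mapping
theorem foldl_append_map {α β : Type} (f : α → β) (l : List α) (acc : List β) :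
    l.foldl (fun out x => out ++ [f x]) acc = acc ++ l.map f := by
  induction l generalizing acc with
  | nil => simp
  | cons x xs ih => simp [ih]

-- B computes the rows in closed form
theorem alt_eq (N : Nat) : duotiling_alt (N:Int) = (List.range (N+1)).map rowF := by
  unfold duotiling_alt
  have hb : ((N:Int) + 1 - 0).toNat = N + 1 := by omega
  rw [PySem.List.pyRange_one, hb, List.foldl_map, foldl_append_map, List.nil_append]
  apply List.map_congr_left
  intro k hk
  have e1 : ((0:Int) + (k:Int)).toNat = k := by omega
  simp only [e1, fibPair_eq]
  rfl

-- setting the element just after a prefix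
theorem set_append_cons {α : Type} (xs : List α) (y v : α) (ys : List α) :
    (xs ++ y :: ys).set xs.length v = xs ++ v :: ys := by
  induction xs with
  | nil => rfl
  | cons x xs ih => simp [ih]

-- one iteration of A's loop on the invariant state
theorem step_eq (N m : Nat) (hm : m + 1 ≤ N) :
    duotilingStep ((List.range (m+1)).map rowF ++ List.replicate (N-m) ([0,0,0,0] : List Int)) ((m:Int)+1)
      = (List.range (m+2)).map rowF ++ List.replicate (N-(m+1)) [0,0,0,0] := by
  have hrep : List.replicate (N-m) ([0,0,0,0] : List Int)
      = [0,0,0,0] :: List.replicate (N-(m+1)) [0,0,0,0] := by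
    have : N - m = (N - (m+1)) + 1 := by omega
    rw [this, List.replicate_succ]
  have hlen : ((List.range (m+1)).map rowF).length = m + 1 := by simp
  have hprev : ∀ (tail : List (List Int)),
      PySem.List.pyGet? ((List.range (m+1)).map rowF ++ tail) ((m:Int)) = some (rowF m) := by
    intro tail
    rw [PySem.List.pyGet?_natCast, List.getElem?_append_left (by omega)]
    simp
  have hlenI : (((List.range (m+1)).map rowF).length : Int) = (m:Int) + 1 := by
    rw [hlen]; omega
  have htoNatI : ((m:Int)+1).toNat = ((List.range (m+1)).map rowF).length := by
    rw [hlen]; omega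
  have hatI : ∀ (rest : List (List Int)),
      PySem.List.pyGet? ((List.range (m+1)).map rowF ++ ([0,0,0,0] : List Int) :: rest) ((m:Int)+1)
        = some [0,0,0,0] := by
    intro rest
    rw [← hlenI]
    exact PySem.List.pyGet?_append_length _ _ _
  have hat1I : ∀ (rest : List (List Int)) (r : List Int),
      PySem.List.pyGet? ((List.range (m+1)).map rowF ++ r :: rest) ((m:Int)+1) = some r := by
    intro rest r
    rw [← hlenI]
    exact PySem.List.pyGet?_append_length _ _ _
  unfold duotilingStep
  rw [hrep]
  simp only [add_sub_cancel_right, hprev, Option.getD_some, hatI, htoNatI, set_append_cons,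
    hat1I]
  have hrow : (([0,0,0,0]:List Int).set 0 ((PySem.List.pyGet? (rowF m) 3).getD 0)).set 3
      ((PySem.List.pyGet? (rowF m) 0).getD 0 + (PySem.List.pyGet? (rowF m) 3).getD 0)
      = rowF (m+1) := by
    show (([0,0,0,0]:List Int).set 0 (fibF (m+1))).set 3 (fibF m + fibF (m+1)) = rowF (m+1)
    rfl
  rw [hrow]
  simp [List.range_succ]

-- A's loop invariant
theorem loop_inv (N : Nat) (m : Nat) (hm : m ≤ N) :
    (PySem.List.pyRange 1 ((m:Int)+1) 1).foldl duotilingStep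
      (rowF 0 :: List.replicate N ([0,0,0,0] : List Int))
      = (List.range (m+1)).map rowF ++ List.replicate (N-m) [0,0,0,0] := by
  induction m with
  | zero =>
    rw [PySem.List.pyRange_one_eq_nil (by omega)]
    simp [List.range_succ]
  | succ m ih =>
    have hcast : ((m+1:Nat):Int) + 1 = ((m:Int) + 1) + 1 := by push_cast; ring
    rw [hcast, PySem.List.pyRange_one_succ_right (by omega), List.foldl_append,
        ih (by omega), List.foldl_cons, List.foldl_nil]
    exact step_eq N m hm

-- ===== VERDICT (by name: the statement is the Claim_ definition above) =====
theorem duotiling_spec : Claim_equal_duotiling := by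
  intro n _ hpre
  obtain ⟨N, rfl⟩ := Int.eq_ofNat_of_zero_le hpre
  unfold Spec_duotiling duotiling
  have hinit : (PySem.List.pyRange 0 ((N:Int)+1) 1).map
      (fun _ => (PySem.List.pyRange 0 4 1).map (fun _ => (0:Int)))
      = List.replicate (N+1) [0,0,0,0] := by
    rw [List.eq_replicate_iff]
    constructor
    · simp [PySem.List.length_pyRange_one]
    · intro b hb
      obtain ⟨x, _, rfl⟩ := List.mem_map.mp hb
      decide
  rw [hinit, List.replicate_succ]
  have hset : (([0,0,0,0] : List Int).set 3 1) = rowF 0 := by decide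
  simp only [hset]
  rw [loop_inv N N le_rfl, Nat.sub_self, List.replicate_zero, List.append_nil, alt_eq]
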